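-- pv_equiv track=rewrite | github.com/GfSE/fas4sysmlv2 | src/io/usecase-activity-editor/fas_frontend.py | CreateActivitiesAndObjectFlows
-- ===== SOURCE A (Python) =====
-- def  My_GrowCellArray(clOld, newEntry):
-- # This function is there due to porting from another programming language without an "append()" function
-- # It shall be fully replaced by "append()" during further code cleaning
--      clOld.append(newEntry)
--      return clOld
--
-- def isConnected (vConnectorXY, vActivityPositions, rTolerancePixels):
--      bret = False;
--      if (vConnectorXY[0] > (vActivityPositions[0] - rTolerancePixels)) and (vConnectorXY[0] < (vActivityPositions[2] + rTolerancePixels)):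
--          #Top line of activity rectangle
--          if vConnectorXY[1] > (vActivityPositions[1] - rTolerancePixels) and vConnectorXY[1] < (vActivityPositions[1] + rTolerancePixels):
--              bret = True
--          #Bottom line of activity rectangle
--          if vConnectorXY[1] > (vActivityPositions[3] - rTolerancePixels) and vConnectorXY[1] < (vActivityPositions[3] + rTolerancePixels):
--              bret = True;
--      if vConnectorXY[1] > (vActivityPositions[1] - rTolerancePixels) and vConnectorXY[1] < (vActivityPositions[3] + rTolerancePixels):
--          # Left line of activity rectangle
--          if vConnectorXY[0] > (vActivityPositions[0] - rTolerancePixels) and vConnectorXY[0] < (vActivityPositions[0] + rTolerancePixels):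
--              bret = True;
--          # Right line of activity rectangle
--          if vConnectorXY[0] > (vActivityPositions[2] - rTolerancePixels) and vConnectorXY[0] < (vActivityPositions[2] + rTolerancePixels):
--              bret = True;
--
--
--      return bret
--
-- def CreateActivitiesAndObjectFlows(clActivityNames, clActivityPositionVectors,clConnectorNames,clConnectorPositionVectors,rTolerancePixels):
--      clActivitiesAndObjectFlows = []
--      for nActivity in range(len(clActivityPositionVectors)):
--          vActPositions = clActivityPositionVectors[nActivity]
--          for nConnector in range(len(clConnectorPositionVectors)):
--              vConnPositions = clConnectorPositionVectors[nConnector]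
--              if isConnected ([vConnPositions[0],vConnPositions[1]], vActPositions, rTolerancePixels):
--                  for nActivity2 in range(len(clActivityPositionVectors)):
--                      if isConnected ([vConnPositions[2],vConnPositions[3]], clActivityPositionVectors[nActivity2], rTolerancePixels):
--                          clActivitiesAndObjectFlows = My_GrowCellArray(clActivitiesAndObjectFlows,clActivityNames[nActivity] + ':' + clConnectorNames[nConnector] + ':' + clActivityNames[nActivity2]  )
--
--      return clActivitiesAndObjectFlows
-- ===== SOURCE B (Python) =====
-- def _touches(x, y, act, tol):
--     x0, y0, x1, y1 = act[0], act[1], act[2], act[3]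
--     in_x = (x0 - tol) < x < (x1 + tol)
--     in_y = (y0 - tol) < y < (y1 + tol)
--     near_top    = (y0 - tol) < y < (y0 + tol)
--     near_bottom = (y1 - tol) < y < (y1 + tol)
--     near_left   = (x0 - tol) < x < (x0 + tol)
--     near_right  = (x1 - tol) < x < (x1 + tol)
--     return (in_x and (near_top or near_bottom)) or (in_y and (near_left or near_right))
--
-- def CreateActivitiesAndObjectFlows(clActivityNames, clActivityPositionVectors, clConnectorNames, clConnectorPositionVectors, rTolerancePixels):
--     n_act = len(clActivityPositionVectors)
--     n_conn = len(clConnectorPositionVectors)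
--     # connectors whose START endpoint touches each activity (ascending)
--     start_index = [[c for c in range(n_conn)
--                     if _touches(clConnectorPositionVectors[c][0], clConnectorPositionVectors[c][1],
--                                 clActivityPositionVectors[a], rTolerancePixels)]
--                    for a in range(n_act)]
--     # activities touched by each connector's END endpoint (ascending)
--     end_index = [[a for a in range(n_act)
--                   if _touches(clConnectorPositionVectors[c][2], clConnectorPositionVectors[c][3],
--                               clActivityPositionVectors[a], rTolerancePixels)]
--                  for c in range(n_conn)]
--     out = []
--     for a in range(n_act):
--         for c in start_index[a]:
--             for a2 in end_index[c]:
--                 out.append(clActivityNames[a] + ':' + clConnectorNames[c] + ':' + clActivityNames[a2])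
--     return out
-- ===== Notes on version B (the rewrite author's own statement) =====
-- stated objective: alternative
-- what changed: B precomputes once, in single sweeps, a start-index (activity -> ascending list of connectors whose start endpoint touches it) and an end-index (connector -> ascending list of activities its end endpoint touches), then emits flows by iterating over these match lists instead of A's repeated inner full scans with re-evaluated tolerance tests (measured ~3x at mid sizes but not confirmed at the largest); the endpoint test itself is a single boolean expression instead of A's sequential flag updates.
-- outside the precondition, e.g. on CreateActivitiesAndObjectFlows(['A'], [[0, 0, 10, 10]], ['C'], [[100, 100]], 1): A returns [], B raises IndexError
import Mathlib
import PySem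

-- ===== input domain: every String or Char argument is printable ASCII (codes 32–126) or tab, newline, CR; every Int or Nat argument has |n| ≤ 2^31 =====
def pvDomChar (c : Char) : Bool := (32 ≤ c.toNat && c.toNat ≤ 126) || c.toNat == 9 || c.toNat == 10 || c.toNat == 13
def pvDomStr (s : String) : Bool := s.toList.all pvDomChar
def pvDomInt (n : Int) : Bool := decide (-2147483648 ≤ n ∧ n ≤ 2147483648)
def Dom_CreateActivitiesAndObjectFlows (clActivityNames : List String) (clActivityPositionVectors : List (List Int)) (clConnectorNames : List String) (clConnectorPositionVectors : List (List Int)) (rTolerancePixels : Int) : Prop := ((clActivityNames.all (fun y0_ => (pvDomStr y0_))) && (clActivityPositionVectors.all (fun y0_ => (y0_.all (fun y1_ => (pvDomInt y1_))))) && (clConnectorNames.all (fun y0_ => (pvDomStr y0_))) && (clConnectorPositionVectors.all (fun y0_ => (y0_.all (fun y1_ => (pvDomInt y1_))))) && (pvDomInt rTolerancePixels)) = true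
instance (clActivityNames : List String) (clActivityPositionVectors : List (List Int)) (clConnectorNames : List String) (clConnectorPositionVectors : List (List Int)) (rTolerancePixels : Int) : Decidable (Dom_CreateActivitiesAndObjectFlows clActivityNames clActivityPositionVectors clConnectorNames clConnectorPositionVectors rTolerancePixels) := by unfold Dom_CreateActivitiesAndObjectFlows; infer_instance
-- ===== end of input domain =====

-- B precomputes start/end adjacency lists once and emits flows by indexed traversal, removing A's repeated full scans (alternative decomposition, same output order).

-- ===== PORT A =====
def isConnected (vConnectorXY : List Int) (vActivityPositions : List Int) (rTolerancePixels : Int) : Bool :=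
  let x := vConnectorXY.getD 0 0
  let y := vConnectorXY.getD 1 0
  let a0 := vActivityPositions.getD 0 0
  let a1 := vActivityPositions.getD 1 0
  let a2 := vActivityPositions.getD 2 0
  let a3 := vActivityPositions.getD 3 0
  let bret := false
  let bret :=
    if decide (x > a0 - rTolerancePixels) && decide (x < a2 + rTolerancePixels) then
      let bret := if decide (y > a1 - rTolerancePixels) && decide (y < a1 + rTolerancePixels) then true else bret
      if decide (y > a3 - rTolerancePixels) && decide (y < a3 + rTolerancePixels) then true else bret
    else bret
  let bret :=
    if decide (y > a1 - rTolerancePixels) && decide (y < a3 + rTolerancePixels) then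
      let bret := if decide (x > a0 - rTolerancePixels) && decide (x < a0 + rTolerancePixels) then true else bret
      if decide (x > a2 - rTolerancePixels) && decide (x < a2 + rTolerancePixels) then true else bret
    else bret
  bret

def CreateActivitiesAndObjectFlows (clActivityNames : List String) (clActivityPositionVectors : List (List Int)) (clConnectorNames : List String) (clConnectorPositionVectors : List (List Int)) (rTolerancePixels : Int) : List String :=
  (List.range clActivityPositionVectors.length).foldl (fun acc nActivity =>
    let vActPositions := clActivityPositionVectors.getD nActivity []
    (List.range clConnectorPositionVectors.length).foldl (fun acc nConnector =>
      let vConnPositions := clConnectorPositionVectors.getD nConnector []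
      if isConnected [vConnPositions.getD 0 0, vConnPositions.getD 1 0] vActPositions rTolerancePixels then
        (List.range clActivityPositionVectors.length).foldl (fun acc nActivity2 =>
          if isConnected [vConnPositions.getD 2 0, vConnPositions.getD 3 0] (clActivityPositionVectors.getD nActivity2 []) rTolerancePixels then
            acc ++ [clActivityNames.getD nActivity "" ++ ":" ++ clConnectorNames.getD nConnector "" ++ ":" ++ clActivityNames.getD nActivity2 ""]
          else acc) acc
      else acc) acc) []

-- ===== PORT B =====
def touches (x y : Int) (act : List Int) (tol : Int) : Bool :=
  let x0 := act.getD 0 0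
  let y0 := act.getD 1 0
  let x1 := act.getD 2 0
  let y1 := act.getD 3 0
  let inX := decide (x0 - tol < x) && decide (x < x1 + tol)
  let inY := decide (y0 - tol < y) && decide (y < y1 + tol)
  let nearTop := decide (y0 - tol < y) && decide (y < y0 + tol)
  let nearBottom := decide (y1 - tol < y) && decide (y < y1 + tol)
  let nearLeft := decide (x0 - tol < x) && decide (x < x0 + tol)
  let nearRight := decide (x1 - tol < x) && decide (x < x1 + tol)
  (inX && (nearTop || nearBottom)) || (inY && (nearLeft || nearRight))

def CreateActivitiesAndObjectFlows_alt (clActivityNames : List String) (clActivityPositionVectors : List (List Int)) (clConnectorNames : List String) (clConnectorPositionVectors : List (List Int)) (rTolerancePixels : Int) : List String :=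
  let nAct := clActivityPositionVectors.length
  let nConn := clConnectorPositionVectors.length
  let startIndex := (List.range nAct).map (fun a =>
    (List.range nConn).filter (fun c =>
      touches ((clConnectorPositionVectors.getD c []).getD 0 0) ((clConnectorPositionVectors.getD c []).getD 1 0)
        (clActivityPositionVectors.getD a []) rTolerancePixels))
  let endIndex := (List.range nConn).map (fun c =>
    (List.range nAct).filter (fun a =>
      touches ((clConnectorPositionVectors.getD c []).getD 2 0) ((clConnectorPositionVectors.getD c []).getD 3 0)
        (clActivityPositionVectors.getD a []) rTolerancePixels))
  (List.range nAct).foldl (fun out a =>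
    (startIndex.getD a []).foldl (fun out c =>
      (endIndex.getD c []).foldl (fun out a2 =>
        out ++ [clActivityNames.getD a "" ++ ":" ++ clConnectorNames.getD c "" ++ ":" ++ clActivityNames.getD a2 ""]) out) out) []

-- ===== PRECONDITION & SPEC =====
-- Pre_ excludes inputs on which Python A raises IndexError (a position vector with fewer than 4 entries, or a
-- name list shorter than its position list, while both position lists are nonempty); on the excluded inputs A can
-- still return a trivial [] when the faulty entry is never reached (see cites), but B's index building reads every
-- connector vector and would raise there.
def Pre_CreateActivitiesAndObjectFlows (clActivityNames : List String) (clActivityPositionVectors : List (List Int)) (clConnectorNames : List String) (clConnectorPositionVectors : List (List Int)) (rTolerancePixels : Int) : Prop :=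
  clActivityPositionVectors = [] ∨ clConnectorPositionVectors = [] ∨
    ((∀ v ∈ clActivityPositionVectors, 4 ≤ v.length) ∧ (∀ v ∈ clConnectorPositionVectors, 4 ≤ v.length) ∧
     clActivityPositionVectors.length ≤ clActivityNames.length ∧
     clConnectorPositionVectors.length ≤ clConnectorNames.length)
instance (clActivityNames : List String) (clActivityPositionVectors : List (List Int)) (clConnectorNames : List String) (clConnectorPositionVectors : List (List Int)) (rTolerancePixels : Int) : Decidable (Pre_CreateActivitiesAndObjectFlows clActivityNames clActivityPositionVectors clConnectorNames clConnectorPositionVectors rTolerancePixels) := by unfold Pre_CreateActivitiesAndObjectFlows; infer_instance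

def pvWitness_CreateActivitiesAndObjectFlows : List String × List (List Int) × List String × List (List Int) × Int :=
  (["A0", "A1"], [[0, 0, 10, 10], [20, 0, 30, 10]], ["C0"], [[10, 5, 20, 5]], 2)

def Spec_CreateActivitiesAndObjectFlows (clActivityNames : List String) (clActivityPositionVectors : List (List Int)) (clConnectorNames : List String) (clConnectorPositionVectors : List (List Int)) (rTolerancePixels : Int) (out : List String) : Prop := out = CreateActivitiesAndObjectFlows_alt clActivityNames clActivityPositionVectors clConnectorNames clConnectorPositionVectors rTolerancePixels
instance (clActivityNames : List String) (clActivityPositionVectors : List (List Int)) (clConnectorNames : List String) (clConnectorPositionVectors : List (List Int)) (rTolerancePixels : Int) (out : List String) : Decidable (Spec_CreateActivitiesAndObjectFlows clActivityNames clActivityPositionVectors clConnectorNames clConnectorPositionVectors rTolerancePixels out) := by unfold Spec_CreateActivitiesAndObjectFlows; infer_instance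

-- ===== CLAIM (what is proved, stated in full; the proofs are below) =====
def Claim_equal_CreateActivitiesAndObjectFlows : Prop := ∀ (clActivityNames : List String) (clActivityPositionVectors : List (List Int)) (clConnectorNames : List String) (clConnectorPositionVectors : List (List Int)) (rTolerancePixels : Int), Dom_CreateActivitiesAndObjectFlows clActivityNames clActivityPositionVectors clConnectorNames clConnectorPositionVectors rTolerancePixels → Pre_CreateActivitiesAndObjectFlows clActivityNames clActivityPositionVectors clConnectorNames clConnectorPositionVectors rTolerancePixels → Spec_CreateActivitiesAndObjectFlows clActivityNames clActivityPositionVectors clConnectorNames clConnectorPositionVectors rTolerancePixels (CreateActivitiesAndObjectFlows clActivityNames clActivityPositionVectors clConnectorNames clConnectorPositionVectors rTolerancePixels)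

-- ===== LEMMAS AND PROOFS =====

-- A's sequential bret updates compute the same Boolean as B's single expression.
lemma conn_eq (x y : Int) (act : List Int) (t : Int) :
    isConnected [x, y] act t = touches x y act t := by
  simp only [isConnected, touches, List.getD_cons_zero, List.getD_cons_succ, gt_iff_lt]
  generalize decide (act.getD 0 0 - t < x) = p1
  generalize decide (x < act.getD 2 0 + t) = p2
  generalize decide (act.getD 1 0 - t < y) = p3
  generalize decide (y < act.getD 1 0 + t) = p4
  generalize decide (act.getD 3 0 - t < y) = p5
  generalize decide (y < act.getD 3 0 + t) = p6
  generalize decide (x < act.getD 0 0 + t) = p7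
  generalize decide (act.getD 2 0 - t < x) = p8
  cases p1 <;> cases p2 <;> cases p3 <;> cases p4 <;> cases p5 <;> cases p6 <;> cases p7 <;> cases p8 <;> rfl

lemma append_ite_nil {β : Type} (b : Bool) (acc xs : List β) :
    (if b then acc ++ xs else acc) = acc ++ (if b then xs else []) := by
  cases b <;> simp

lemma flatMap_ite_singleton {α β : Type} (p : α → Bool) (f : α → β) (l : List α) :
    l.flatMap (fun x => if p x then [f x] else []) = (l.filter p).map f := by
  induction l with
  | nil => rfl
  | cons a l ih => by_cases hp : p a <;> simp [hp, ih]

lemma flatMap_filter_eq {α β : Type} (p : α → Bool) (h : α → List β) (l : List α) :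
    (l.filter p).flatMap h = l.flatMap (fun x => if p x then h x else []) := by
  induction l with
  | nil => rfl
  | cons a l ih => by_cases hp : p a <;> simp [hp, ih]

theorem CreateActivitiesAndObjectFlows_spec : Claim_equal_CreateActivitiesAndObjectFlows := by
  intro clActivityNames clActivityPositionVectors clConnectorNames clConnectorPositionVectors rTolerancePixels _ _
  unfold Spec_CreateActivitiesAndObjectFlows
  simp only [CreateActivitiesAndObjectFlows, CreateActivitiesAndObjectFlows_alt]
  simp only [conn_eq]
  simp only [append_ite_nil, PySem.List.foldl_append_singleton_eq_map,
    PySem.List.foldl_append_eq_flatMap, List.nil_append]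
  apply List.flatMap_congr
  intro a ha
  rw [PySem.List.getD_map_range _ _ _ _ (List.mem_range.mp ha), flatMap_filter_eq]
  apply List.flatMap_congr
  intro c hc
  rw [PySem.List.getD_map_range _ _ _ _ (List.mem_range.mp hc)]
  split
  · exact flatMap_ite_singleton _ _ _
  · rfl
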